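-- pv_equiv track=rewrite | github.com/thealper2/codewars-solutions | 7-kyu/heggeleggleggo.py | heggeleggleggo
-- ===== SOURCE A (Python) =====
-- def heggeleggleggo(word):
--     result = ""
--     vowels = ' aeiouAEIOU'
--     for c in word:
--         result += c
--         if c not in vowels:
--             result += "egg"
--
--     return result
-- ===== SOURCE B (Python) =====
-- def heggeleggleggo(word):
--     vowels = ' aeiouAEIOU'
--     table = {ord(c): c + 'egg' for c in set(word) if c not in vowels}
--     return word.translate(table)
-- ===== Notes on version B (the rewrite author's own statement) =====
-- stated objective: alternative
-- what changed: Instead of scanning the word and appending per character, B first builds a translation table keyed by the code points of the word's distinct non-vowel characters and then performs the whole rewrite with one str.translate call.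
import Mathlib
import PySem

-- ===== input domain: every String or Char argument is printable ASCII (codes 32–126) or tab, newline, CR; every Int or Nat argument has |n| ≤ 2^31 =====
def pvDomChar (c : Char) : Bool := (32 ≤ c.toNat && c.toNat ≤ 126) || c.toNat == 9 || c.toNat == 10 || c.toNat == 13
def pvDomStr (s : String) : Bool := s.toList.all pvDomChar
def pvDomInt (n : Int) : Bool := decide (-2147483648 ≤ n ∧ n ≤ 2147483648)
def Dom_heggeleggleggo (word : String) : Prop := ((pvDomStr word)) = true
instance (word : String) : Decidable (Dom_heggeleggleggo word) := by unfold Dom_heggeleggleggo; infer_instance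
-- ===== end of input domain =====

-- B builds a translation table over the word's distinct non-vowel characters and rewrites with one str.translate call (alternative algorithm, same return value).

-- ===== PORT A =====
-- A: result = ""; for c in word: result += c; if c not in vowels: result += "egg"
def heggeleggleggo (word : String) : String :=
  String.ofList (word.toList.foldl (fun result c =>
    let result := result ++ [c]
    if ¬ ((' '.toString ++ "aeiouAEIOU").toList.contains c) then result ++ "egg".toList else result) [])

-- ===== PORT B =====
-- B: table = {ord(c): c + 'egg' for c in set(word) if c not in vowels}
def heggTable (word : String) : PySem.Dict Int (List Char) :=
  ((PySem.Set.ofList word.toList).filter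
      (fun c => ¬ ((' '.toString ++ "aeiouAEIOU").toList.contains c))).foldl
    (fun d c => d.insert (c.toNat : Int) ([c] ++ "egg".toList)) PySem.Dict.empty

-- B: return word.translate(table) — each char replaced by its table entry, kept if absent
def heggeleggleggo_alt (word : String) : String :=
  String.ofList (word.toList.flatMap (fun c =>
    match (heggTable word).get? (c.toNat : Int) with
    | some s => s
    | none => [c]))

-- ===== PRECONDITION & SPEC =====
def Spec_heggeleggleggo (word : String) (out : String) : Prop := out = heggeleggleggo_alt word
instance (word : String) (out : String) : Decidable (Spec_heggeleggleggo word out) := by unfold Spec_heggeleggleggo; infer_instance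

-- ===== CLAIM (what is proved, stated in full; the proofs are below) =====
def Claim_equal_heggeleggleggo : Prop := ∀ (word : String), Dom_heggeleggleggo word → Spec_heggeleggleggo word (heggeleggleggo word)

-- ===== LEMMAS AND PROOFS =====

theorem charToNat_inj : Function.Injective Char.toNat :=
  fun a b h => Char.ext (UInt32.toNat_inj.mp h)

theorem hegg_items (word : String) :
    (heggTable word).items =
      ((PySem.Set.ofList word.toList).filter
          (fun c => ¬ ((' '.toString ++ "aeiouAEIOU").toList.contains c))).map
        (fun c => ((c.toNat : Int), [c] ++ "egg".toList)) := by
  unfold heggTable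
  rw [PySem.Dict.items_foldl_insert_fresh]
  · rfl
  · intro a _; simp [PySem.Dict.contains_empty]
  · refine (List.nodup_map_iff_inj_on ?_).mpr ?_
    · exact (PySem.Set.nodup_ofList word.toList).filter _
    · intro _ _ _ _ h
      exact charToNat_inj (by exact_mod_cast h)

theorem hegg_nodup_keys (word : String) : (heggTable word).keys.Nodup := by
  unfold heggTable
  exact PySem.Dict.nodup_keys_foldl_insert_key _ _ _ _ PySem.Dict.nodup_keys_empty

theorem hegg_get (word : String) (c : Char) (hc : c ∈ word.toList) :
    (heggTable word).get? (c.toNat : Int) =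
      if ((' '.toString ++ "aeiouAEIOU").toList.contains c) then none
      else some ([c] ++ "egg".toList) := by
  split
  · next hv =>
    rw [PySem.Dict.get?_eq_none_iff_not_mem_keys]
    intro hmem
    have : ((c.toNat : Int)) ∈ (heggTable word).items.map (·.1) := hmem
    rw [hegg_items] at this
    simp only [List.map_map, List.mem_map, Function.comp] at this
    obtain ⟨b, hb, hbe⟩ := this
    have hbc : b = c := charToNat_inj (by exact_mod_cast hbe)
    subst hbc
    exact absurd hv (by simpa using (List.mem_filter.mp hb).2)
  · next hv =>
    refine PySem.Dict.get?_of_mem_items _ ?_ (hegg_nodup_keys word)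
    rw [hegg_items]
    refine List.mem_map.mpr ⟨c, ?_, rfl⟩
    refine List.mem_filter.mpr ⟨?_, by simpa using hv⟩
    exact (PySem.Set.mem_ofList _ _).mpr hc

-- A's accumulator loop is the concatenation of per-character expansions
theorem hegg_foldl_eq_flatMap (l acc : List Char) :
    l.foldl (fun result c =>
      let result := result ++ [c]
      if ¬ ((' '.toString ++ "aeiouAEIOU").toList.contains c) then result ++ "egg".toList else result) acc
    = acc ++ l.flatMap (fun c =>
        if ((' '.toString ++ "aeiouAEIOU").toList.contains c) then [c] else [c] ++ "egg".toList) := by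
  induction l generalizing acc with
  | nil => simp
  | cons c t ih =>
    simp only [List.foldl_cons, List.flatMap_cons, ih]
    cases h : (' '.toString ++ "aeiouAEIOU").toList.contains c
    · simp
    · simp

-- flatMap over a sublist of word agrees once every character's table lookup is known
theorem hegg_flatMap_congr (word : String) (l : List Char) (h : ∀ c ∈ l, c ∈ word.toList) :
    l.flatMap (fun c =>
        if ((' '.toString ++ "aeiouAEIOU").toList.contains c) then [c] else [c] ++ "egg".toList)
    = l.flatMap (fun c =>
        match (heggTable word).get? (c.toNat : Int) with
        | some s => s
        | none => [c]) := by
  induction l with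
  | nil => rfl
  | cons c t ih =>
    simp only [List.flatMap_cons]
    rw [ih (fun x hx => h x (List.mem_cons_of_mem _ hx)),
        hegg_get word c (h c (List.mem_cons_self ..))]
    cases hv : (' '.toString ++ "aeiouAEIOU").toList.contains c <;> simp

-- ===== VERDICT (by name: the statement is the Claim_ definition above) =====
theorem heggeleggleggo_spec : Claim_equal_heggeleggleggo := by
  intro word _
  unfold Spec_heggeleggleggo heggeleggleggo heggeleggleggo_alt
  rw [hegg_foldl_eq_flatMap, hegg_flatMap_congr word word.toList (fun _ h => h)]
  simp
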